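-- pv_equiv track=rewrite | github.com/mdo6180/python-projects | mdo9_223_P5.py | oldest_at_retirement
-- ===== SOURCE A (Python) =====
-- def oldest_at_retirement(p_db):
-- 	#age at retirement is age at inauguration plus number of years in office
-- 	#retirement age is appended to list and database
-- 	#database is dictionary with president's name as keys and age as values
--
-- 	list = []
-- 	database = {}
-- 	for keys, values in p_db.items():
-- 		list.append(values[2] + values[1])
-- 		database[keys] = (values[2] + values[1])
--
-- 	#max() is used to find oldest age
-- 	age = max(list)
--
-- 	#if president's age is equal to variable age, his name is appended to names
-- 	names = []
-- 	for keys in database.keys():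
-- 		if database[keys] == age:
-- 			names.append(keys)
--
-- 	#name is sorted in alphabetical order
-- 	#tuple of age and a list of the presidents is returned
-- 	names = sorted(names)
-- 	answer = (age, names)
-- 	return answer
-- ===== SOURCE B (Python) =====
-- def oldest_at_retirement(p_db):
--     # Group president names by retirement age in one pass, then pick the max bucket.
--     groups = {}
--     for name, values in p_db.items():
--         groups.setdefault(values[2] + values[1], []).append(name)
--     age = max(groups)
--     return (age, sorted(groups[age]))
-- ===== Notes on version B (the rewrite author's own statement) =====
-- stated objective: simpler
-- what changed: B replaces A's two loops (sum list + parallel name->age dict, then a rescan of the dict for names matching the max) by a single grouping pass building an age->names dict, then takes max over the group keys and sorts the matching bucket directly.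
-- outside the precondition, e.g. on oldest_at_retirement({}): A raises ValueError, B raises ValueError
import Mathlib
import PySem

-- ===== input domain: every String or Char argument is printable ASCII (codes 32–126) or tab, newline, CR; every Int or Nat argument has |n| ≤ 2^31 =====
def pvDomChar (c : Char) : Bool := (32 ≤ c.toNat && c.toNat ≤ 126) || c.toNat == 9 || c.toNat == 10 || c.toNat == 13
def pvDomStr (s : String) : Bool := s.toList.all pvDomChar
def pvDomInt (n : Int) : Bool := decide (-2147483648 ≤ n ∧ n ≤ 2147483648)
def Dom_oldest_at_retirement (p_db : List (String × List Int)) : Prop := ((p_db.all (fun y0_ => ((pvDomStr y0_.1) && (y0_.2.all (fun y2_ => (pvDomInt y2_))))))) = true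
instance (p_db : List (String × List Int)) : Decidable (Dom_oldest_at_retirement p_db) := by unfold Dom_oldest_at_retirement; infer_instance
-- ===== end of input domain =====

-- B replaces A's two loops (sum list + name->age dict, then a rescan of the dict for names
-- matching the max) by a single grouping pass building an age->names dict; objective: simpler.


-- ===== PORT A =====
def oldest_at_retirement (p_db : List (String × List Int)) : Int × List String :=
  let st := p_db.foldl
    (fun (st : List Int × PySem.Dict String Int) kv =>
      (st.1 ++ [PySem.List.pyGetD kv.2 2 0 + PySem.List.pyGetD kv.2 1 0],
       st.2.insert kv.1 (PySem.List.pyGetD kv.2 2 0 + PySem.List.pyGetD kv.2 1 0)))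
    ([], PySem.Dict.empty)
  let age : Int := (PySem.List.max? st.1 (fun y => y)).getD 0   -- max([]) raises ValueError: Pre_ excludes p_db = []
  let names := (PySem.Dict.keys st.2).foldl
    (fun acc k => if PySem.Dict.getD st.2 k 0 = age then acc ++ [k] else acc) []
  (age, PySem.List.sorted names (fun y => y) false)

-- ===== PORT B =====
def oldest_at_retirement_alt (p_db : List (String × List Int)) : Int × List String :=
  let groups := p_db.foldl
    (fun (g : PySem.Dict Int (List String)) kv =>
      g.modify (PySem.List.pyGetD kv.2 2 0 + PySem.List.pyGetD kv.2 1 0) [] (fun l => l ++ [kv.1]))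
    PySem.Dict.empty
  let age : Int := (PySem.List.max? (PySem.Dict.keys groups) (fun y => y)).getD 0
  (age, PySem.List.sorted (PySem.Dict.getD groups age []) (fun y => y) false)

-- ===== PRECONDITION & SPEC =====
-- Pre_ excludes exactly the crashes (max() of the empty p_db raises ValueError; values[2]/values[1]
-- raise IndexError when a value list has fewer than 3 entries) and association lists with duplicate
-- keys, which cannot arise from a Python dict (dict keys are unique), so no input A accepts is excluded.
def Pre_oldest_at_retirement (p_db : List (String × List Int)) : Prop :=
  p_db ≠ [] ∧ (∀ kv ∈ p_db, 3 ≤ kv.2.length) ∧ (p_db.map Prod.fst).Nodup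
instance (p_db : List (String × List Int)) : Decidable (Pre_oldest_at_retirement p_db) := by
  unfold Pre_oldest_at_retirement; infer_instance
def pvWitness_oldest_at_retirement : (List (String × List Int)) :=
  [("washington", [1789, 8, 57]), ("adams", [1797, 4, 61])]

def Spec_oldest_at_retirement (p_db : List (String × List Int)) (out : Int × List String) : Prop := out = oldest_at_retirement_alt p_db
instance (p_db : List (String × List Int)) (out : Int × List String) : Decidable (Spec_oldest_at_retirement p_db out) := by unfold Spec_oldest_at_retirement; infer_instance

-- ===== CLAIM (what is proved, stated in full; the proofs are below) =====
def Claim_equal_oldest_at_retirement : Prop := ∀ (p_db : List (String × List Int)), Dom_oldest_at_retirement p_db → Pre_oldest_at_retirement p_db → Spec_oldest_at_retirement p_db (oldest_at_retirement p_db)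

-- ===== LEMMAS AND PROOFS =====

-- the retirement age of one entry (values[2] + values[1])
def pvAge (kv : String × List Int) : Int :=
  PySem.List.pyGetD kv.2 2 0 + PySem.List.pyGetD kv.2 1 0

-- fold the literal sum into pvAge
theorem pvAge_def (kv : String × List Int) :
    PySem.List.pyGetD kv.2 2 0 + PySem.List.pyGetD kv.2 1 0 = pvAge kv := rfl

-- A's combined fold splits into the sum list and an insert-only fold
theorem aFold_split (xs : List (String × List Int)) (l0 : List Int) (d0 : PySem.Dict String Int) :
    xs.foldl
      (fun (st : List Int × PySem.Dict String Int) kv =>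
        (st.1 ++ [pvAge kv], st.2.insert kv.1 (pvAge kv)))
      (l0, d0)
    = (l0 ++ xs.map pvAge, xs.foldl (fun d kv => d.insert kv.1 (pvAge kv)) d0) := by
  induction xs generalizing l0 d0 with
  | nil => simp
  | cons kv t ih => simp [ih]

-- A's database: items in p_db order (keys are fresh at every step, by Nodup)
theorem dbA_items (p_db : List (String × List Int)) (hnd : (p_db.map Prod.fst).Nodup) :
    (p_db.foldl (fun (d : PySem.Dict String Int) kv => d.insert kv.1 (pvAge kv)) PySem.Dict.empty).items
    = p_db.map (fun kv => (kv.1, pvAge kv)) := by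
  have := PySem.Dict.items_foldl_insert_fresh (l := p_db) (k := Prod.fst) (v := pvAge)
      (d := PySem.Dict.empty) (by simp [PySem.Dict.contains_empty]) hnd
  simpa using this

-- B's groups: keys are the distinct sums
theorem groups_keys (p_db : List (String × List Int)) :
    (p_db.foldl (fun (g : PySem.Dict Int (List String)) kv =>
        g.modify (pvAge kv) [] (fun l => l ++ [kv.1])) PySem.Dict.empty).keys
    = PySem.Set.ofList (p_db.map pvAge) := by
  rw [PySem.Dict.keys_foldl_modify_key (key := pvAge)]; rfl

-- B's groups: the bucket at c holds the names whose sum is c, in p_db order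
theorem groups_getD (p_db : List (String × List Int)) (c : Int) :
    (p_db.foldl (fun (g : PySem.Dict Int (List String)) kv =>
        g.modify (pvAge kv) [] (fun l => l ++ [kv.1])) PySem.Dict.empty).getD c []
    = ((p_db.map (fun kv => (pvAge kv, kv.1))).filter (fun p => p.1 == c)).map (·.2) := by
  rw [← List.foldl_map (f := fun kv : String × List Int => (pvAge kv, kv.1))
      (g := fun (d : PySem.Dict Int (List String)) p => d.modify p.1 [] (fun l => l ++ [p.2]))]
  rw [PySem.Dict.getD_foldl_modify_append]
  simp

-- max over the distinct sums is max over the sums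
theorem max_dedup (sums : List Int) (hne : sums ≠ []) :
    (PySem.List.max? sums (fun y => y)).getD 0
    = (PySem.List.max? (PySem.Set.ofList sums) (fun y => y)).getD 0 := by
  have hAne : PySem.List.max? sums (fun y => y) ≠ none :=
    fun h => hne ((PySem.List.max?_eq_none_iff _ _).mp h)
  obtain ⟨mA, hA⟩ := Option.ne_none_iff_exists'.mp hAne
  have hne' : PySem.Set.ofList sums ≠ [] := by
    cases sums with
    | nil => simp at hne
    | cons a t =>
      intro h
      have : a ∈ PySem.Set.ofList (a :: t) := (PySem.Set.mem_ofList _ _).mpr (by simp)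
      simp [h] at this
  have hBne : PySem.List.max? (PySem.Set.ofList sums) (fun y => y) ≠ none :=
    fun h => hne' ((PySem.List.max?_eq_none_iff _ _).mp h)
  obtain ⟨mB, hB⟩ := Option.ne_none_iff_exists'.mp hBne
  rw [hA, hB]
  have hAmem := PySem.List.max?_mem hA
  have hBmem := (PySem.Set.mem_ofList _ _).mp (PySem.List.max?_mem hB)
  have h1 := PySem.List.max?_isMax hA mB hBmem
  have h2 := PySem.List.max?_isMax hB mA ((PySem.Set.mem_ofList _ _).mpr hAmem)
  simp only [Option.getD_some]
  exact le_antisymm h2 h1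

-- A's names loop over the keys is a filter
theorem namesA_filter (d : PySem.Dict String Int) (age : Int) (ks : List String) :
    ks.foldl (fun acc k => if d.getD k 0 = age then acc ++ [k] else acc) []
    = ks.filter (fun k => d.getD k 0 == age) := by
  have := PySem.List.foldl_append_if (fun k => d.getD k 0 == age) (fun k : String => k) ks []
  simpa using this

-- ===== VERDICT (by name: the statement is the Claim_ definition above) =====
theorem oldest_at_retirement_spec : Claim_equal_oldest_at_retirement := by
  intro p_db _ hpre
  obtain ⟨hne, _, hnd⟩ := hpre
  unfold Spec_oldest_at_retirement
  simp only [oldest_at_retirement, oldest_at_retirement_alt, pvAge_def, aFold_split,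
    List.nil_append]
  rw [groups_keys, groups_getD]
  set dbA := p_db.foldl (fun (d : PySem.Dict String Int) kv => d.insert kv.1 (pvAge kv))
      PySem.Dict.empty with hdbA
  have hsne : p_db.map pvAge ≠ [] := by simpa using hne
  rw [max_dedup _ hsne]
  set age := (PySem.List.max? (PySem.Set.ofList (p_db.map pvAge)) (fun y => y)).getD 0 with hagedef
  have hitems := dbA_items p_db hnd
  rw [← hdbA] at hitems
  have hkeys : dbA.keys = p_db.map Prod.fst := by
    simp only [PySem.Dict.keys, hitems, List.map_map]; rfl
  have hgetD : ∀ kv ∈ p_db, dbA.getD kv.1 0 = pvAge kv := by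
    intro kv hkv
    exact PySem.Dict.getD_of_mem_items dbA
      (by rw [hitems]; exact List.mem_map_of_mem hkv) (by rw [hkeys]; exact hnd) 0
  rw [hkeys, namesA_filter, List.filter_map, List.filter_map, List.map_map]
  have hfil : p_db.filter ((fun k => dbA.getD k 0 == age) ∘ Prod.fst)
      = p_db.filter ((fun p => p.1 == age) ∘ fun kv => (pvAge kv, kv.1)) := by
    apply List.filter_congr
    intro kv hkv
    simp [Function.comp, hgetD kv hkv]
  rw [hfil]
  rfl
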